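-- pv_equiv track=rewrite | github.com/taeukkkim/Algorithm | 탐욕법(Greedy)/프로그래머스_조이스틱.py | solution
-- ===== SOURCE A (Python) =====
-- def solution(name):
--     answer = 0
--     changes = [min(ord(n) - ord('A'), ord('Z') - ord(n) + 1) for n in name]
--     i = 0
--
--     while True:
--         answer += changes[i]
--         changes[i] = 0
--
--         if sum(changes) == 0:
--             break
--
--         left = right = 1
--         while changes[i-left] == 0:
--             left += 1
--         while changes[i+right] == 0:
--             right += 1
--
--         if left < right:
--             answer += left
--             i -= left
--         else:
--             answer += right
--             i += right
--
--     return answer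
-- ===== SOURCE B (Python) =====
-- def solution(name):
--     n = len(name)
--     vals = [min(ord(c) - ord('A'), ord('Z') - ord(c) + 1) for c in name]
--     alive = [p for p in range(n) if vals[p] != 0]
--     total = sum(vals)
--     answer = vals[0]
--     total -= vals[0]
--     a, b = 0, len(alive) - 1
--     if a <= b and alive[a] == 0:
--         a += 1
--     i = 0
--     while total != 0:
--         lo, hi = alive[a], alive[b]
--         dl = i - (hi - n)
--         dr = lo - i
--         if dl < dr:
--             answer += dl + vals[hi]
--             total -= vals[hi]
--             i = hi - n
--             b -= 1
--         else:
--             answer += dr + vals[lo]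
--             total -= vals[lo]
--             i = lo
--             a += 1
--     return answer
-- ===== Notes on version B (the rewrite author's own statement) =====
-- stated objective: faster
-- what changed: Replaces the per-step rescans (sum(changes) each iteration plus linear left/right searches) by a two-pointer walk over the precomputed sorted list of nonzero positions: the nearest nonzero neighbour on either side is always the minimum or maximum remaining position, so each step is O(1).
import Mathlib
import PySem

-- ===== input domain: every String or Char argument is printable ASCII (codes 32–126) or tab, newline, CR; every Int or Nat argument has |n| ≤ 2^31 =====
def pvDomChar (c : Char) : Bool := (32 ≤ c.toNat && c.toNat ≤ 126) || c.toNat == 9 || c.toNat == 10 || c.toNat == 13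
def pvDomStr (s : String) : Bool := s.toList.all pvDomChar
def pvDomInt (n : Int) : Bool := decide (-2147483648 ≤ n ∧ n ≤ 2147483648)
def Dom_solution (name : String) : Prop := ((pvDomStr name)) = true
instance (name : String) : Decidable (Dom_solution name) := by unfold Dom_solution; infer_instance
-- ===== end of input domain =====

-- B replaces A's per-step rescans by a two-pointer walk over the sorted list of nonzero
-- positions (the nearest nonzero neighbour is always the min or max remaining position): O(n) vs O(n^2).

-- ===== PORT A =====
-- min(ord(c) - ord('A'), ord('Z') - ord(c) + 1)
def pvCost (c : Char) : Int := min ((c.toNat : Int) - 65) (90 - (c.toNat : Int) + 1)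

-- while changes[i-left] == 0: left += 1   (fueled; none = IndexError, junk value there)
def solutionScanL (ch : List Int) (i : Int) : Nat → Int → Int
  | 0, l => l
  | f + 1, l =>
    match PySem.List.pyGet? ch (i - l) with
    | some v => if v = 0 then solutionScanL ch i f (l + 1) else l
    | none => l

-- while changes[i+right] == 0: right += 1
def solutionScanR (ch : List Int) (i : Int) : Nat → Int → Int
  | 0, r => r
  | f + 1, r =>
    match PySem.List.pyGet? ch (i + r) with
    | some v => if v = 0 then solutionScanR ch i f (r + 1) else r
    | none => r

-- the 'while True' loop (fueled; it runs at most one iteration per nonzero entry plus one)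
def solutionLoop (ch : List Int) (i ans : Int) : Nat → Int
  | 0 => ans
  | f + 1 =>
    let c := PySem.List.pyGetD ch i 0
    let ch2 := PySem.List.pySetD ch i 0
    let ans2 := ans + c
    if ch2.sum = 0 then ans2
    else
      let left := solutionScanL ch2 i (2 * ch2.length + 2) 1
      let right := solutionScanR ch2 i (2 * ch2.length + 2) 1
      if left < right then solutionLoop ch2 (i - left) (ans2 + left) f
      else solutionLoop ch2 (i + right) (ans2 + right) f

def solution (name : String) : Int :=
  let changes := name.toList.map pvCost
  solutionLoop changes 0 0 (changes.length + 1)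

-- ===== PORT B =====
-- while total != 0: take the nearer of the two window ends, pay distance plus its cost, shrink the window
def solutionAltLoop (vals alive : List Int) (n : Int) : Nat → Int → Int → Int → Int → Int → Int
  | 0, _, _, _, ans, _ => ans
  | f + 1, a, b, i, ans, total =>
    if total = 0 then ans
    else
      let lo := PySem.List.pyGetD alive a 0
      let hi := PySem.List.pyGetD alive b 0
      let dl := i - (hi - n)
      let dr := lo - i
      if dl < dr then
        let v := PySem.List.pyGetD vals hi 0
        solutionAltLoop vals alive n f a (b - 1) (hi - n) (ans + dl + v) (total - v)
      else
        let v := PySem.List.pyGetD vals lo 0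
        solutionAltLoop vals alive n f (a + 1) b lo (ans + dr + v) (total - v)

def solution_alt (name : String) : Int :=
  let n : Int := (name.toList.length : Int)
  let vals := name.toList.map pvCost
  let alive := (PySem.List.pyRange 0 n 1).filter (fun p => !(PySem.List.pyGetD vals p 0 == 0))
  let ans := PySem.List.pyGetD vals 0 0
  let total := vals.sum - ans
  let b : Int := (alive.length : Int) - 1
  let a : Int := if 0 ≤ b ∧ PySem.List.pyGetD alive 0 0 = 0 then 1 else 0
  solutionAltLoop vals alive n (alive.length + 1) a b 0 ans total

-- ===== PRECONDITION & SPEC =====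
-- Pre_ excludes only the empty string, on which A raises IndexError (changes[0]).
def Pre_solution (name : String) : Prop := name ≠ ""
instance (name : String) : Decidable (Pre_solution name) := by unfold Pre_solution; infer_instance

def pvWitness_solution : String := "JEROEN"

def Spec_solution (name : String) (out : Int) : Prop := out = solution_alt name
instance (name : String) (out : Int) : Decidable (Spec_solution name out) := by unfold Spec_solution; infer_instance

-- ===== CLAIM (what is proved, stated in full; the proofs are below) =====
def Claim_equal_solution : Prop := ∀ (name : String), Dom_solution name → Pre_solution name → Spec_solution name (solution name)

-- ===== LEMMAS AND PROOFS =====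
-- ===== helpers =====
def cellOf (n : Nat) (i : Int) : Nat := (if 0 ≤ i then i else i + n).toNat

theorem cellOf_lt {n : Nat} {j : Int} (h1 : -(n:Int) ≤ j) (h2 : j < n) : cellOf n j < n := by
  unfold cellOf; split <;> omega

theorem pyGet_cell {ch : List Int} {n : Nat} (hl : ch.length = n) {j : Int}
    (h1 : -(n:Int) ≤ j) (h2 : j < n) :
    PySem.List.pyGet? ch j = some (ch.getD (cellOf n j) 0) := by
  have hc : cellOf n j < ch.length := by rw [hl]; exact cellOf_lt h1 h2
  simp only [PySem.List.pyGet?, PySem.List.pyIdx?, hl]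
  by_cases h0 : 0 ≤ j
  · have hcj : cellOf n j = j.toNat := by unfold cellOf; simp [h0]
    simp only [h0, if_pos, if_pos (by omega : j < (n:Int)), Option.bind, ← hcj]
    simp [List.getD, List.getElem?_eq_getElem hc]
  · have hcj : n - (-j).toNat = cellOf n j := by unfold cellOf; omega
    simp only [h0, if_pos h1, Option.bind, hcj]
    simp [List.getD, List.getElem?_eq_getElem hc]

theorem pySet_cell {ch : List Int} {n : Nat} (hl : ch.length = n) {j : Int}
    (h1 : -(n:Int) ≤ j) (h2 : j < n) :
    PySem.List.pySetD ch j 0 = ch.set (cellOf n j) 0 := by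
  simp only [PySem.List.pySetD, PySem.List.pySet?, PySem.List.pyIdx?, hl]
  by_cases h0 : 0 ≤ j
  · have hcj : cellOf n j = j.toNat := by unfold cellOf; simp [h0]
    simp [h0, if_pos (by omega : j < (n:Int)), hcj]
  · have hcj : n - (-j).toNat = cellOf n j := by unfold cellOf; omega
    simp [h0, if_pos h1, hcj]

theorem scanL_eq {ch : List Int} {i t v : Int} (htar : PySem.List.pyGet? ch t = some v)
    (hv : v ≠ 0) : ∀ (f : Nat) (l : Int), l ≤ i - t → (i - t - l).toNat < f →
    (∀ j : Int, l ≤ j → j < i - t → PySem.List.pyGet? ch (i - j) = some 0) →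
    solutionScanL ch i f l = i - t := by
  intro f
  induction f with
  | zero => intro l _ hf _; omega
  | succ f ih =>
    intro l hl hf hzero
    by_cases he : l = i - t
    · have h2 : i - l = t := by omega
      simp [solutionScanL, htar, hv, he]
    · have h0 : PySem.List.pyGet? ch (i - l) = some 0 := hzero l le_rfl (by omega)
      simp only [solutionScanL, h0]
      rw [if_pos trivial]
      exact ih (l+1) (by omega) (by omega) (fun j hj1 hj2 => hzero j (by omega) hj2)

theorem scanR_eq {ch : List Int} {i t v : Int} (htar : PySem.List.pyGet? ch t = some v)
    (hv : v ≠ 0) : ∀ (f : Nat) (r : Int), r ≤ t - i → (t - i - r).toNat < f →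
    (∀ j : Int, r ≤ j → j < t - i → PySem.List.pyGet? ch (i + j) = some 0) →
    solutionScanR ch i f r = t - i := by
  intro f
  induction f with
  | zero => intro r _ hf _; omega
  | succ f ih =>
    intro r hr hf hzero
    by_cases he : r = t - i
    · have h2 : i + r = t := by omega
      simp [solutionScanR, htar, hv, he]
    · have h0 : PySem.List.pyGet? ch (i + r) = some 0 := hzero r le_rfl (by omega)
      simp only [solutionScanR, h0]
      rw [if_pos trivial]
      exact ih (r+1) (by omega) (by omega) (fun j hj1 hj2 => hzero j (by omega) hj2)

theorem sum_set_zero (l : List Int) (k : Nat) (h : k < l.length) :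
    (l.set k 0).sum = l.sum - l[k] := by
  induction l generalizing k with
  | nil => simp at h
  | cons x t ih =>
    cases k with
    | zero => simp [List.set]
    | succ k => simp only [List.set, List.sum_cons, ih k (by simpa using h)]; simp; ring

theorem filter_map_sum (l : List Nat) (q : Nat → Bool) (f : Nat → Int)
    (h : ∀ x ∈ l, ¬ q x → f x = 0) : ((l.filter q).map f).sum = (l.map f).sum := by
  induction l with
  | nil => rfl
  | cons x t ih =>
    by_cases hq : q x <;>
      simp [hq, ih (fun y hy => h y (List.mem_cons_of_mem _ hy)), h x List.mem_cons_self]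

-- ===== MAIN =====
theorem pvMain (vals : List Int) (av : List Nat) (n : Nat)
    (hav_pw : av.Pairwise (· < ·))
    (hav_mem : ∀ p ∈ av, p < n ∧ vals.getD p 0 ≠ 0) :
    ∀ (fA fB : Nat) (a e : Nat) (ch : List Int) (i ans : Int),
    a ≤ e → e ≤ av.length →
    ch.length = n →
    (∀ p : Nat, p < n → ch.getD p 0 =
      (if p ∈ (av.drop a).take (e - a) ∨ p = cellOf n i then vals.getD p 0 else 0)) →
    cellOf n i ∉ (av.drop a).take (e - a) →
    ch.sum = ((((av.drop a).take (e - a)).map (fun p => vals.getD p 0)).sum) + vals.getD (cellOf n i) 0 →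
    -(n:Int) ≤ i → i < n →
    (0 ≤ i → ∀ p ∈ (av.drop a).take (e - a), i < (p:Int)) →
    (i < 0 → ∀ p ∈ (av.drop a).take (e - a), (p:Int) < (n:Int) + i) →
    e - a < fA → e - a < fB →
    solutionLoop ch i ans fA
      = solutionAltLoop vals (List.map (fun p : Nat => (p : Int)) av) n fB a ((e:Int) - 1) i
          (ans + vals.getD (cellOf n i) 0)
          ((((av.drop a).take (e - a)).map (fun p => vals.getD p 0)).sum) := by
  intro fA
  induction fA with
  | zero => intro fB a e ch i ans _ _ _ _ _ _ _ _ _ _ hfa _; omega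
  | succ f ih =>
    intro fB a e ch i ans hae he hchlen hch hcell hsum hi1 hi2 hposL hnegL hfa hfb
    obtain ⟨g, rfl⟩ : ∃ g, fB = g + 1 := ⟨fB - 1, by omega⟩
    set S := (av.drop a).take (e - a) with hS
    set fval : Nat → Int := fun p => vals.getD p 0 with hfval
    set cell := cellOf n i with hcelldef
    have hcelllt : cell < n := cellOf_lt hi1 hi2
    -- unfold A one step
    have hgetc : PySem.List.pyGetD ch i 0 = fval cell := by
      simp only [PySem.List.pyGetD, pyGet_cell hchlen hi1 hi2, Option.getD_some]
      rw [hch cell hcelllt]; simp [hfval, List.getD]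
    have hset : PySem.List.pySetD ch i 0 = ch.set cell 0 := pySet_cell hchlen hi1 hi2
    have hch2len : (ch.set cell 0).length = n := by simp [hchlen]
    have hch2 : ∀ p : Nat, p < n → (ch.set cell 0).getD p 0 = (if p ∈ S then fval p else 0) := by
      intro p hp
      by_cases hpc : p = cell
      · have h0 : (ch.set cell 0).getD p 0 = 0 := by
          rw [hpc]; simp [List.getD, hchlen ▸ hcelllt]
        rw [h0, if_neg (by rw [hpc]; exact hcell)]
      · have : (ch.set cell 0).getD p 0 = ch.getD p 0 := by
          simp [List.getD, Ne.symm hpc]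
        rw [this, hch p hp]
        simp [hpc, hfval]
    have hch2sum : (ch.set cell 0).sum = (S.map fval).sum := by
      have hk : cell < ch.length := hchlen ▸ hcelllt
      rw [sum_set_zero ch cell hk, hsum]
      have : ch[cell] = ch.getD cell 0 := (List.getD_eq_getElem ch 0 hk).symm
      rw [this, hch cell hcelllt]; simp
    set ch2 := ch.set cell 0 with hch2def
    set L := solutionScanL ch2 i (2 * n + 2) 1 with hLdef
    set R := solutionScanR ch2 i (2 * n + 2) 1 with hRdef
    rw [show solutionLoop ch i ans (f+1) =
        (if (S.map fval).sum = 0 then ans + fval cell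
         else if L < R then solutionLoop ch2 (i - L) (ans + fval cell + L) f
          else solutionLoop ch2 (i + R) (ans + fval cell + R) f) from by
      simp only [solutionLoop, hset, hgetc, ← hch2def, hch2len, hch2sum, hLdef, hRdef]]
    by_cases hT : (S.map fval).sum = 0
    · rw [if_pos hT]
      rw [show solutionAltLoop vals (List.map (fun p : Nat => (p : Int)) av) n (g+1) a ((e:Int)-1) i
            (ans + fval cell) ((S.map fval).sum) = ans + fval cell from by
        simp only [solutionAltLoop]; rw [if_pos hT]]
    · rw [if_neg hT]
      -- S is nonempty
      have hSne : S ≠ [] := by intro h; rw [h] at hT; simp at hT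
      have hSlen : S.length = e - a := by rw [hS]; simp; omega
      have hea : a < e := by
        rcases Nat.lt_or_ge a e with h | h
        · exact h
        · exfalso; apply hSne; rw [hS, show e - a = 0 from by omega]; rfl
      have hae1 : e - 1 < av.length := by omega
      have halt : a < av.length := by omega
      obtain ⟨k, hk⟩ : ∃ k, e - a = k + 1 := ⟨e - a - 1, by omega⟩
      set hd := av[a]'halt with hhd
      set lt := av[e-1]'hae1 with hltdef
      have hdropS : av.drop a = hd :: av.drop (a+1) := List.drop_eq_getElem_cons halt
      have hScons : S = hd :: (av.drop (a+1)).take k := by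
        rw [hS, hk, hdropS, List.take_succ_cons]
      have hkd : k < (av.drop a).length := by simp; omega
      have hgd : (av.drop a)[k]'hkd = lt := by
        rw [List.getElem_drop, hltdef]; congr 1; omega
      have hSsnoc : S = (av.drop a).take k ++ [lt] := by
        rw [hS, hk, List.take_succ_eq_append_getElem hkd, hgd]
      have hSub : S.Sublist av := by
        rw [hS]; exact (List.take_sublist _ _).trans (List.drop_sublist _ _)
      have hS_pw : S.Pairwise (· < ·) := hav_pw.sublist hSub
      have hmemS : ∀ p ∈ S, p < n ∧ fval p ≠ 0 := fun p hp => hav_mem p (hSub.mem hp)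
      have hhdS : hd ∈ S := by rw [hScons]; exact List.mem_cons_self
      have hltS : lt ∈ S := by rw [hSsnoc]; exact List.mem_append_right _ (by simp)
      have hmintail : ∀ p ∈ (av.drop (a+1)).take k, hd < p := by
        have h2 := hScons ▸ hS_pw
        exact (List.pairwise_cons.mp h2).1
      have hmaxinit : ∀ p ∈ (av.drop a).take k, p < lt := by
        have h2 := hSsnoc ▸ hS_pw
        rw [List.pairwise_append] at h2
        intro p hp; exact h2.2.2 p hp lt (by simp)
      have hmin : ∀ p ∈ S, hd ≤ p := by
        intro p hp; rw [hScons] at hp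
        rcases List.mem_cons.mp hp with h | h
        · omega
        · exact le_of_lt (hmintail p h)
      have hmax : ∀ p ∈ S, p ≤ lt := by
        intro p hp; rw [hSsnoc] at hp
        rcases List.mem_append.mp hp with h | h
        · exact le_of_lt (hmaxinit p h)
        · simp at h; omega
      have hltn : lt < n := (hmemS lt hltS).1
      have hhdn : hd < n := (hmemS hd hhdS).1
      -- B-side window ends
      have hlo : PySem.List.pyGetD (List.map (fun p : Nat => (p : Int)) av) ((a:Nat):Int) 0 = (hd:Int) := by
        rw [PySem.List.pyGetD_natCast]
        have hlen : a < (List.map (fun p : Nat => (p : Int)) av).length := by simpa using halt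
        simp only [List.getD, List.getElem?_eq_getElem hlen, Option.getD_some, List.getElem_map]
        rw [hhd]
      have hhi : PySem.List.pyGetD (List.map (fun p : Nat => (p : Int)) av) ((e:Int) - 1) 0 = (lt:Int) := by
        rw [show ((e:Int) - 1) = (((e-1:Nat)):Int) from by omega, PySem.List.pyGetD_natCast]
        have hlen : e - 1 < (List.map (fun p : Nat => (p : Int)) av).length := by simpa using hae1
        simp only [List.getD, List.getElem?_eq_getElem hlen, Option.getD_some, List.getElem_map]
        rw [hltdef]
      -- distances
      have hiL : (lt:Int) - n < i := by
        by_cases h0 : 0 ≤ i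
        · omega
        · have := hnegL (by omega) lt hltS; omega
      have hiR : i < (hd:Int) := by
        by_cases h0 : 0 ≤ i
        · exact hposL h0 hd hhdS
        · omega
      -- scan targets
      have hcl : cellOf n ((lt:Int) - n) = lt := by unfold cellOf; split <;> omega
      have hcr : cellOf n ((hd:Int)) = hd := by unfold cellOf; split <;> omega
      have htarL : PySem.List.pyGet? ch2 ((lt:Int) - n) = some (fval lt) := by
        rw [pyGet_cell hch2len (by omega) (by omega), hcl, hch2 lt hltn, if_pos hltS]
      have htarR : PySem.List.pyGet? ch2 ((hd:Int)) = some (fval hd) := by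
        rw [pyGet_cell hch2len (by omega) (by omega), hcr, hch2 hd hhdn, if_pos hhdS]
      -- zeros between
      have hzL : ∀ j : Int, 1 ≤ j → j < i - ((lt:Int) - n) →
          PySem.List.pyGet? ch2 (i - j) = some 0 := by
        intro j hj1 hj2
        have hjv1 : -(n:Int) ≤ i - j := by omega
        have hjv2 : i - j < n := by omega
        rw [pyGet_cell hch2len hjv1 hjv2, hch2 _ (cellOf_lt hjv1 hjv2), if_neg]
        intro hmem
        by_cases h0 : 0 ≤ i - j
        · have hcv : (cellOf n (i-j) : Int) = i - j := by unfold cellOf; split <;> omega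
          have h0i : 0 ≤ i := by omega
          have := hposL h0i _ hmem; omega
        · have hcv : (cellOf n (i-j) : Int) = i - j + n := by unfold cellOf; split <;> omega
          have := hmax _ hmem; omega
      have hzR : ∀ j : Int, 1 ≤ j → j < (hd:Int) - i →
          PySem.List.pyGet? ch2 (i + j) = some 0 := by
        intro j hj1 hj2
        have hjv1 : -(n:Int) ≤ i + j := by omega
        have hjv2 : i + j < n := by omega
        rw [pyGet_cell hch2len hjv1 hjv2, hch2 _ (cellOf_lt hjv1 hjv2), if_neg]
        intro hmem
        by_cases h0 : 0 ≤ i + j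
        · have hcv : (cellOf n (i+j) : Int) = i + j := by unfold cellOf; split <;> omega
          have := hmin _ hmem; omega
        · have hcv : (cellOf n (i+j) : Int) = i + j + n := by unfold cellOf; split <;> omega
          have := hnegL (by omega) _ hmem; omega
      have hL : L = i - ((lt:Int) - n) :=
        scanL_eq htarL (hmemS lt hltS).2 (2*n+2) 1 (by omega) (by omega) hzL
      have hR : R = (hd:Int) - i :=
        scanR_eq htarR (hmemS hd hhdS).2 (2*n+2) 1 (by omega) (by omega) hzR
      -- unfold B one step
      have hvlt : PySem.List.pyGetD vals ((lt:Nat):Int) 0 = fval lt := by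
        rw [PySem.List.pyGetD_natCast]
      have hvhd : PySem.List.pyGetD vals ((hd:Nat):Int) 0 = fval hd := by
        rw [PySem.List.pyGetD_natCast]
      rw [show solutionAltLoop vals (List.map (fun p : Nat => (p : Int)) av) n (g+1) a ((e:Int)-1) i
            (ans + fval cell) ((S.map fval).sum)
          = (if i - ((lt:Int) - n) < (hd:Int) - i then
              solutionAltLoop vals (List.map (fun p : Nat => (p : Int)) av) n g a ((e:Int) - 1 - 1)
                ((lt:Int) - n) (ans + fval cell + (i - ((lt:Int) - n)) + fval lt)
                ((S.map fval).sum - fval lt)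
             else
              solutionAltLoop vals (List.map (fun p : Nat => (p : Int)) av) n g ((a:Int) + 1) ((e:Int) - 1)
                ((hd:Int)) (ans + fval cell + ((hd:Int) - i) + fval hd)
                ((S.map fval).sum - fval hd)) from by
        simp only [solutionAltLoop]
        rw [if_neg hT, hlo, hhi, hvlt, hvhd]]
      rw [hL, hR]
      -- sums over the shrunk windows
      have hsum_snoc : (S.map fval).sum = ((((av.drop a).take k).map fval).sum) + fval lt := by
        rw [hSsnoc]; simp
      have hsum_cons : (S.map fval).sum = fval hd + ((((av.drop (a+1)).take k).map fval).sum) := by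
        rw [hScons]; simp
      by_cases hbr : i - ((lt:Int) - n) < (hd:Int) - i
      · rw [if_pos hbr, if_pos hbr]
        have harg : i - (i - ((lt:Int) - n)) = (lt:Int) - n := by ring
        rw [harg]
        have ihe := ih g a (e-1) ch2 ((lt:Int) - n) (ans + fval cell + (i - ((lt:Int) - n)))
          (by omega) (by omega) hch2len
          (by
            intro p hp
            rw [hch2 p hp, show (e-1) - a = k from by omega]
            have hmem : p ∈ S ↔ (p ∈ (av.drop a).take k ∨ p = lt) := by
              rw [hSsnoc]; simp
            rw [hcl]
            by_cases hin : p ∈ S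
            · rw [if_pos hin, if_pos (hmem.mp hin)]
            · rw [if_neg hin, if_neg (fun h => hin (hmem.mpr h))]
          )
          (by
            rw [hcl, show (e-1) - a = k from by omega]
            intro hmem; exact absurd (hmaxinit lt hmem) (by omega))
          (by
            rw [hcl, show (e-1) - a = k from by omega, hch2sum, hsum_snoc])
          (by omega) (by omega)
          (by intro h0; exfalso; omega)
          (by
            intro _ p hp
            rw [show (e-1) - a = k from by omega] at hp
            have := hmaxinit p hp; omega)
          (by omega) (by omega)
        rw [show (e-1) - a = k from by omega] at ihe
        rw [ihe, hcl, show (((e-1:Nat)):Int) - 1 = (e:Int) - 1 - 1 from by omega, hsum_snoc]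
        ring_nf
        rfl
      · rw [if_neg hbr, if_neg hbr]
        have harg : i + ((hd:Int) - i) = (hd:Int) := by ring
        rw [harg]
        have ihe := ih g (a+1) e ch2 ((hd:Int)) (ans + fval cell + ((hd:Int) - i))
          (by omega) he hch2len
          (by
            intro p hp
            rw [hch2 p hp, show e - (a+1) = k from by omega]
            have hmem : p ∈ S ↔ (p ∈ (av.drop (a+1)).take k ∨ p = hd) := by
              rw [hScons]; simp [or_comm]
            rw [hcr]
            by_cases hin : p ∈ S
            · rw [if_pos hin, if_pos (hmem.mp hin)]
            · rw [if_neg hin, if_neg (fun h => hin (hmem.mpr h))]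
          )
          (by
            rw [hcr, show e - (a+1) = k from by omega]
            intro hmem; exact absurd (hmintail hd hmem) (by omega))
          (by
            rw [hcr, show e - (a+1) = k from by omega, hch2sum, hsum_cons]; ring)
          (by omega) (by omega)
          (by
            intro _ p hp
            rw [show e - (a+1) = k from by omega] at hp
            have := hmintail p hp; omega)
          (by intro h0; exfalso; omega)
          (by omega) (by omega)
        rw [show e - (a+1) = k from by omega] at ihe
        rw [ihe, hcr, show (((a+1:Nat)):Int) = (a:Int) + 1 from by omega, hsum_cons]
        ring_nf
        rfl

theorem solution_eq_alt (name : String) (h : name ≠ "") : solution name = solution_alt name := by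
  have hcs : name.toList ≠ [] := fun hh => h (String.toList_eq_nil_iff.mp hh)
  set vals := name.toList.map pvCost with hvals
  set n := name.toList.length with hndef
  have hn : vals.length = n := by simp [hvals, hndef]
  have hn1 : 1 ≤ n := by
    rw [hndef]; exact List.length_pos_of_ne_nil hcs
  set avN := (List.range n).filter (fun p => !(vals.getD p 0 == 0)) with havN
  have halive : (PySem.List.pyRange 0 (n:Int) 1).filter
      (fun p => !(PySem.List.pyGetD vals p 0 == 0)) = List.map (fun p : Nat => (p : Int)) avN := by
    rw [PySem.List.pyRange_zero_natCast, List.filter_map]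
    congr 1
    apply List.filter_congr
    intro p _
    simp only [Function.comp_apply, PySem.List.pyGetD_natCast]
  have hav_pw : avN.Pairwise (· < ·) := List.Pairwise.sublist List.filter_sublist List.pairwise_lt_range
  have hav_mem_iff : ∀ p : Nat, p ∈ avN ↔ (p < n ∧ vals.getD p 0 ≠ 0) := by
    intro p; rw [havN, List.mem_filter, List.mem_range]; simp
  have hav_mem : ∀ p ∈ avN, p < n ∧ vals.getD p 0 ≠ 0 := fun p hp => (hav_mem_iff p).mp hp
  have hav_len : avN.length ≤ n := le_trans (List.length_filter_le _ _) (by simp)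
  -- the initial window start
  set a0 : Nat := if vals.getD 0 0 = 0 then 0 else 1 with ha0
  set e0 : Nat := avN.length with he0
  have hzero_mem : vals.getD 0 0 ≠ 0 ↔ 0 ∈ avN := by
    rw [hav_mem_iff]; omega
  have havN_cons : vals.getD 0 0 ≠ 0 → avN = 0 :: avN.drop 1 := by
    intro hz
    have h0 : 0 ∈ avN := hzero_mem.mp hz
    rcases havC : avN with _ | ⟨x, t⟩
    · rw [havC] at h0; simp at h0
    · have hx : x = 0 := by
        rcases List.mem_cons.mp (havC ▸ h0) with hh | hh
        · omega
        · have := (List.pairwise_cons.mp (havC ▸ hav_pw)).1 0 hh; omega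
      simp [hx]
  have hS0 : (avN.drop a0).take (e0 - a0) = avN.drop a0 := by
    apply List.take_of_length_le; simp [he0]
  -- S0 facts
  have hS0_sub : avN.drop a0 ⊆ avN := fun p hp => (List.drop_sublist _ _).mem hp
  have hcell0 : cellOf n 0 = 0 := by unfold cellOf; simp
  have hpos0 : ∀ p ∈ avN.drop a0, (0:Int) < (p:Int) := by
    intro p hp
    have hpav := hS0_sub hp
    by_cases hz : vals.getD 0 0 = 0
    · have h0notin : 0 ∉ avN := fun h0 => (hzero_mem.mpr h0) hz
      have hp0 : p ≠ 0 := fun hh => h0notin (hh ▸ hpav)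
      have : 0 < p := Nat.pos_of_ne_zero hp0
      exact_mod_cast this
    · have ha1 : a0 = 1 := by rw [ha0, if_neg hz]
      rw [ha1] at hp
      have hpw2 : List.Pairwise (· < ·) (0 :: avN.drop 1) := by
        rw [← havN_cons hz]; exact hav_pw
      have := (List.pairwise_cons.mp hpw2).1 p hp
      omega
  have h0notin' : vals.getD 0 0 = 0 → 0 ∉ avN := fun hz h0 => (hzero_mem.mpr h0) hz
  have hcellnot : 0 ∉ avN.drop a0 := by
    by_cases hz : vals.getD 0 0 = 0
    · rw [show a0 = 0 from by rw [ha0, if_pos hz], List.drop_zero]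
      exact h0notin' hz
    · rw [show a0 = 1 from by rw [ha0, if_neg hz]]
      intro hmem
      have hpw2 : List.Pairwise (· < ·) (0 :: avN.drop 1) := by
        rw [← havN_cons hz]; exact hav_pw
      have := (List.pairwise_cons.mp hpw2).1 0 hmem
      omega
  have hvals_range : vals = (List.range n).map (fun p => vals.getD p 0) := by
    apply List.ext_getElem (by simp [hn])
    intro p h1 h2
    simp [List.getD, List.getElem?_eq_getElem h1]
  have hsum_av : vals.sum = (avN.map (fun p => vals.getD p 0)).sum := by
    conv_lhs => rw [hvals_range]
    rw [← filter_map_sum (List.range n) (fun p => !(vals.getD p 0 == 0)) _ (by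
      intro x _ hq
      simp at hq
      exact hq)]
  have hsum0 : vals.sum = ((avN.drop a0).map (fun p => vals.getD p 0)).sum + vals.getD 0 0 := by
    by_cases hz : vals.getD 0 0 = 0
    · rw [show a0 = 0 from by rw [ha0, if_pos hz], List.drop_zero, hz, add_zero]
      exact hsum_av
    · rw [show a0 = 1 from by rw [ha0, if_neg hz]]
      rw [hsum_av, havN_cons hz]
      simp [add_comm]
  have he0a0 : a0 ≤ e0 := by
    by_cases hz : vals.getD 0 0 = 0
    · rw [show a0 = 0 from by rw [ha0, if_pos hz]]; omega
    · rw [show a0 = 1 from by rw [ha0, if_neg hz], he0, havN_cons hz]; simp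
  have hmain := pvMain vals avN n hav_pw hav_mem (n+1) (avN.length+1) a0 e0 vals 0 0
    he0a0 (by rw [he0]) hn
    (by
      intro p hp
      rw [hS0, hcell0]
      by_cases hin : p ∈ avN.drop a0 ∨ p = 0
      · rw [if_pos hin]
      · rw [if_neg hin]
        rw [not_or] at hin
        by_contra hnz
        have hpav : p ∈ avN := (hav_mem_iff p).mpr ⟨hp, hnz⟩
        apply hin.1
        by_cases hz : vals.getD 0 0 = 0
        · rw [show a0 = 0 from by rw [ha0, if_pos hz], List.drop_zero]; exact hpav
        · rw [show a0 = 1 from by rw [ha0, if_neg hz]]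
          have := havN_cons hz ▸ hpav
          rcases List.mem_cons.mp this with hh | hh
          · exact absurd hh hin.2
          · exact hh)
    (by rw [hS0, hcell0]; exact hcellnot)
    (by rw [hS0, hcell0]; exact hsum0)
    (by omega) (by exact_mod_cast hn1)
    (fun _ p hp => hpos0 p (hS0 ▸ hp))
    (fun h0 => absurd h0 (by norm_num))
    (by omega) (by omega)
  have hpg0 : PySem.List.pyGetD vals (0:Int) 0 = vals.getD 0 0 := by
    rw [show (0:Int) = ((0:Nat):Int) from by norm_num, PySem.List.pyGetD_natCast]
  have haB : (if 0 ≤ ((List.map (fun p : Nat => (p : Int)) avN).length : Int) - 1 ∧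
        PySem.List.pyGetD (List.map (fun p : Nat => (p : Int)) avN) 0 0 = 0 then (1:Int) else 0)
      = (a0 : Int) := by
    by_cases hz : vals.getD 0 0 = 0
    · rw [show a0 = 0 from by rw [ha0, if_pos hz], if_neg]
      · norm_num
      rintro ⟨hb, hh⟩
      rcases havC : avN with _ | ⟨x, t⟩
      · rw [havC] at hb; simp at hb
      · rw [havC] at hh
        simp only [List.map_cons, PySem.List.pyGetD, PySem.List.pyGet?_zero_cons,
          Option.getD_some] at hh
        have hx : x = 0 := by exact_mod_cast hh
        exact h0notin' hz (by rw [havC, hx]; exact List.mem_cons_self)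
    · rw [show a0 = 1 from by rw [ha0, if_neg hz], if_pos]
      · norm_num
      constructor
      · rw [havN_cons hz]; simp
      · rw [havN_cons hz]
        simp only [List.map_cons, PySem.List.pyGetD, PySem.List.pyGet?_zero_cons,
          Option.getD_some]
        norm_num
  calc solution name
      = solutionLoop vals 0 0 (n + 1) := by
        rw [show solution name = solutionLoop vals 0 0 (vals.length + 1) from rfl, hn]
    _ = solutionAltLoop vals (List.map (fun p : Nat => (p : Int)) avN) n (avN.length+1)
          a0 ((e0:Int) - 1) 0 (0 + vals.getD (cellOf n 0) 0)
          ((((avN.drop a0).take (e0 - a0)).map (fun p => vals.getD p 0)).sum) := hmain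
    _ = solution_alt name := by
        rw [show solution_alt name = solutionAltLoop vals
            ((PySem.List.pyRange 0 ((name.toList.length : Nat) : Int) 1).filter
              (fun p => !(PySem.List.pyGetD vals p 0 == 0)))
            ((name.toList.length : Nat) : Int)
            (((PySem.List.pyRange 0 ((name.toList.length : Nat) : Int) 1).filter
              (fun p => !(PySem.List.pyGetD vals p 0 == 0))).length + 1)
            (if 0 ≤ (((PySem.List.pyRange 0 ((name.toList.length : Nat) : Int) 1).filter
                  (fun p => !(PySem.List.pyGetD vals p 0 == 0))).length : Int) - 1 ∧
                PySem.List.pyGetD ((PySem.List.pyRange 0 ((name.toList.length : Nat) : Int) 1).filter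
                  (fun p => !(PySem.List.pyGetD vals p 0 == 0))) 0 0 = 0 then 1 else 0)
            ((((PySem.List.pyRange 0 ((name.toList.length : Nat) : Int) 1).filter
              (fun p => !(PySem.List.pyGetD vals p 0 == 0))).length : Int) - 1)
            0 (PySem.List.pyGetD vals 0 0) (vals.sum - PySem.List.pyGetD vals 0 0) from rfl]
        rw [show ((name.toList.length : Nat) : Int) = ((n:Nat):Int) from by rw [hndef]]
        rw [halive, haB, hpg0]
        congr 1
        · simp
        · simp [he0]
        · rw [hcell0, zero_add]
        · rw [hS0, hsum0]; ring

-- ===== VERDICT (by name: the statement is the Claim_ definition above) =====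
theorem solution_spec : Claim_equal_solution := by
  intro name _ hpre
  unfold Spec_solution
  exact solution_eq_alt name hpre
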